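-- pv_equiv track=rewrite | github.com/yeinshin/Algorithm | baekjoon/baekjoon_17609.py | first_check
-- ===== SOURCE A (Python) =====
-- def first_check(s,left,right):
--     while left < right:
--         if s[left] == s[right]:
--             left +=1
--             right -=1
--         else:
--             check1 = second_check(s,left+1,right)
--             check2 = second_check(s,left,right-1)
--
--             if check1 or check2: return 1
--             else: return 2
--     return 0
--
-- def second_check(s,left,right):
--     while left < right:
--         if s[left]==s[right]:
--             left+=1
--             right-=1
--         else: return False
--
--     return True
-- ===== SOURCE B (Python) =====
-- def first_check(s, left, right):
--     if left >= right:
--         return 0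
--     sub = s[left:right + 1]
--     if sub == sub[::-1]:
--         return 0
--     n = len(sub)
--     i = next(k for k in range(n) if sub[k] != sub[n - 1 - k])
--     j = n - 1 - i
--     if sub[i + 1:j + 1] == sub[i + 1:j + 1][::-1] or sub[i:j] == sub[i:j][::-1]:
--         return 1
--     return 2
-- ===== Notes on version B (the rewrite author's own statement) =====
-- stated objective: idiomatic
-- what changed: Replaces the two-pointer while-loops and the second_check helper by slice-and-reverse palindrome tests: B extracts sub = s[left:right+1], compares it with its reversal, locates the single mismatch index, and tests the two one-character-deleted slices by reversal equality.
-- outside the precondition, e.g. on first_check('abca', -4, 3): A returns 2, B returns 1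
import Mathlib
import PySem

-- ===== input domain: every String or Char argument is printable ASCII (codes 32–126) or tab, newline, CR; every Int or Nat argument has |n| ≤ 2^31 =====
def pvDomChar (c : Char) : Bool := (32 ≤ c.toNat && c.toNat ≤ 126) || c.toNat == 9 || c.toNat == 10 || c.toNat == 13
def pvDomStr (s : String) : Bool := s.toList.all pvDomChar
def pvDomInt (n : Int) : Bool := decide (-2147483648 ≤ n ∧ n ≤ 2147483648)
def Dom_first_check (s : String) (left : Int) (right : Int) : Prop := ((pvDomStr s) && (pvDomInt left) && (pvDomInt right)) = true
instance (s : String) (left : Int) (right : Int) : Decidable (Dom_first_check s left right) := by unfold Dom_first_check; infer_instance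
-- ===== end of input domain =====

-- B replaces A's two-pointer while-loops and second_check helper by slice extraction and reversal-equality
-- palindrome tests (idiomatic rewrite, same cost); return-value equivalence is proved on Pre_.


-- ===== PORT A =====
def second_check (s : String) (left : Int) (right : Int) : Bool :=
  if _h : left < right then
    match PySem.Str.pyGet? s left, PySem.Str.pyGet? s right with
    | some a, some b => if a = b then second_check s (left + 1) (right - 1) else false
    | _, _ => false   -- IndexError in Python; excluded by Pre_
  else true
termination_by (right - left).toNat
decreasing_by omega

def first_check (s : String) (left : Int) (right : Int) : Int :=
  if _h : left < right then
    match PySem.Str.pyGet? s left, PySem.Str.pyGet? s right with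
    | some a, some b =>
      if a = b then first_check s (left + 1) (right - 1)
      else
        let check1 := second_check s (left + 1) right
        let check2 := second_check s (left) (right - 1)
        if check1 || check2 then 1 else 2
    | _, _ => 0   -- IndexError in Python; excluded by Pre_
  else 0
termination_by (right - left).toNat
decreasing_by omega

-- ===== PORT B =====
-- port of Source B's 'next(k for k in range(n) if sub[k] != sub[n-1-k])' (0 if no mismatch; Source B never reaches that)
def pvFindMis (sub : List Char) (k : Nat) : Nat :=
  if k < sub.length then
    if sub.getD k ' ' ≠ sub.getD (sub.length - 1 - k) ' ' then k
    else pvFindMis sub (k + 1)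
  else 0
termination_by sub.length - k

def first_check_alt (s : String) (left : Int) (right : Int) : Int :=
  if left ≥ right then 0
  else
    let sub := PySem.List.slice s.toList (some left) (some (right + 1))
    if sub = sub.reverse then 0
    else
      let i := pvFindMis sub 0
      let j := sub.length - 1 - i
      let c1 := PySem.List.slice sub (some ((i : Int) + 1)) (some ((j : Int) + 1))
      let c2 := PySem.List.slice sub (some (i : Int)) (some (j : Int))
      if c1 = c1.reverse ∨ c2 = c2.reverse then 1 else 2

-- ===== PRECONDITION & SPEC =====
-- Pre_ excludes calls with left < right whose endpoint indices are negative or ≥ len(s): there A either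
-- raises IndexError or returns through Python's accidental negative-index wraparound, which is no part of
-- the range-palindrome task; B reads the range as a slice and has no wraparound.
def Pre_first_check (s : String) (left : Int) (right : Int) : Prop :=
  left < right → (0 ≤ left ∧ right < (s.toList.length : Int))
instance (s : String) (left : Int) (right : Int) : Decidable (Pre_first_check s left right) := by
  unfold Pre_first_check; infer_instance

def pvWitness_first_check : String × Int × Int := ("abca", 0, 3)

def Spec_first_check (s : String) (left : Int) (right : Int) (out : Int) : Prop := out = first_check_alt s left right
instance (s : String) (left : Int) (right : Int) (out : Int) : Decidable (Spec_first_check s left right out) := by unfold Spec_first_check; infer_instance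

-- ===== CLAIM (what is proved, stated in full; the proofs are below) =====
def Claim_equal_first_check : Prop := ∀ (s : String) (left : Int) (right : Int), Dom_first_check s left right → Pre_first_check s left right → Spec_first_check s left right (first_check s left right)

-- ===== LEMMAS AND PROOFS =====

lemma pal_short (xs : List Char) (h : xs.length ≤ 1) : xs = xs.reverse := by
  match xs, h with
  | [], _ => rfl
  | [a], _ => rfl

lemma pal_decomp (a b : Char) (m : List Char) :
    (a :: m ++ [b]) = (a :: m ++ [b]).reverse ↔ a = b ∧ m = m.reverse := by
  have hrev : (a :: m ++ [b]).reverse = b :: (m.reverse ++ [a]) := by simp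
  rw [hrev]
  constructor
  · intro h
    obtain ⟨h1, h2⟩ := List.cons_eq_cons.mp h
    subst h1
    exact ⟨rfl, (List.append_left_inj _).mp h2⟩
  · rintro ⟨h1, h2⟩
    subst h1
    rw [← h2]
    simp

lemma notpal_mis (m : List Char) (h : m ≠ m.reverse) :
    ∃ j, j < m.length ∧ m.getD j ' ' ≠ m.getD (m.length - 1 - j) ' ' := by
  by_contra hc
  push_neg at hc
  apply h
  apply List.ext_getElem (by simp)
  intro i h1 h2
  have := hc i h1
  have hb : m.length - 1 - i < m.length := by omega
  rw [List.getD_eq_getElem _ _ h1, List.getD_eq_getElem _ _ hb] at this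
  rw [List.getElem_reverse]
  exact this

lemma seg_decomp (cs : List Char) (l r : Nat) (hlr : l < r) (hr : r < cs.length) :
    (cs.drop l).take (r + 1 - l)
      = cs.getD l ' ' :: ((cs.drop (l + 1)).take (r - 1 + 1 - (l + 1))) ++ [cs.getD r ' '] := by
  have hl : l < cs.length := by omega
  rw [List.drop_eq_getElem_cons hl]
  have h1 : r + 1 - l = (r - l - 1) + 1 + 1 := by omega
  rw [h1, List.take_succ_cons]
  have h2 : r - 1 + 1 - (l + 1) = r - l - 1 := by omega
  rw [h2]
  have h3 : (cs.drop (l + 1)).take (r - l - 1 + 1) = (cs.drop (l+1)).take (r - l - 1) ++ ((cs.drop (l+1))[r - l - 1]?).toList := List.take_add_one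
  rw [h3]
  have h4 : (cs.drop (l+1))[r - l - 1]? = some cs[r] := by
    rw [List.getElem?_drop]
    have : l + 1 + (r - l - 1) = r := by omega
    rw [this, List.getElem?_eq_getElem hr]
  rw [h4]
  simp [List.getD, List.getElem?_eq_getElem hl, List.getElem?_eq_getElem hr]

lemma pyGet_eq (s : String) (i : Int) (h0 : 0 ≤ i) (h1 : i < (s.toList.length : Int)) :
    PySem.Str.pyGet? s i = some (s.toList.getD i.toNat ' ') := by
  have hn : i.toNat < s.toList.length := by omega
  simp [PySem.Str.pyGet?, PySem.List.pyGet?_of_nonneg (h := h0),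
    List.getD, List.getElem?_eq_getElem hn]

lemma sc_spec (s : String) (d : Nat) : ∀ (l r : Int), (r - l).toNat ≤ d → 0 ≤ l → r < (s.toList.length : Int) →
    (second_check s l r
      = decide ((s.toList.drop l.toNat).take (r + 1 - l).toNat
          = ((s.toList.drop l.toNat).take (r + 1 - l).toNat).reverse)) := by
  induction d with
  | zero =>
    intro l r hd hl hr
    have hlr : ¬ l < r := by omega
    rw [second_check]
    simp only [hlr, dite_false]
    have : ((s.toList.drop l.toNat).take (r + 1 - l).toNat).length ≤ 1 := by
      simp only [List.length_take, List.length_drop]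
      omega
    rw [← pal_short _ this]
    simp
  | succ d ih =>
    intro l r hd hl hr
    by_cases hlr : l < r
    · have hr0 : (0:Int) ≤ r := by omega
      have hll : l < (s.toList.length : Int) := by omega
      have hseg := seg_decomp s.toList l.toNat r.toNat (by omega) (by omega)
      have hcast : (r + 1 - l).toNat = r.toNat + 1 - l.toNat := by omega
      have hcast2 : (r - 1 + 1 - (l + 1)).toNat = r.toNat - 1 + 1 - (l.toNat + 1) := by omega
      have hln : (l + 1).toNat = l.toNat + 1 := by omega
      have hih := ih (l+1) (r-1) (by omega) (by omega) (by omega)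
      rw [hln, hcast2] at hih
      rw [second_check]
      simp only [hlr, dite_true]
      rw [pyGet_eq s l hl hll, pyGet_eq s r hr0 hr, hcast, hseg]
      simp only [pal_decomp, Bool.decide_and, ← hih]
      by_cases hab : s.toList.getD l.toNat ' ' = s.toList.getD r.toNat ' ' <;>
        simp [List.getD] at hab ⊢ <;> simp [hab]
    · rw [second_check]
      simp only [hlr, dite_false]
      have : ((s.toList.drop l.toNat).take (r + 1 - l).toNat).length ≤ 1 := by
        simp only [List.length_take, List.length_drop]
        omega
      rw [← pal_short _ this]
      simp

lemma mid_getD (a b : Char) (m : List Char) (k : Nat) (hk : k < m.length) :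
    (a :: m ++ [b]).getD (k + 1) ' ' = m.getD k ' ' := by
  rw [List.cons_append, List.getD_cons_succ]
  exact List.getD_append m [b] ' ' k hk

lemma mid_getD' (a b : Char) (m : List Char) (k : Nat) (hk : k < m.length) :
    (a :: m ++ [b]).getD ((a :: m ++ [b]).length - 1 - (k + 1)) ' ' = m.getD (m.length - 1 - k) ' ' := by
  have hlen : (a :: m ++ [b]).length = m.length + 2 := by simp
  rw [hlen]
  have h1 : m.length + 2 - 1 - (k + 1) = (m.length - 1 - k) + 1 := by omega
  rw [h1, List.cons_append, List.getD_cons_succ]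
  exact List.getD_append m [b] ' ' _ (by omega)

lemma ends_getD_head (a b : Char) (m : List Char) : (a :: m ++ [b]).getD 0 ' ' = a := rfl

lemma ends_getD_last (a b : Char) (m : List Char) :
    (a :: m ++ [b]).getD ((a :: m ++ [b]).length - 1) ' ' = b := by
  have hlen : (a :: m ++ [b]).length = m.length + 2 := by simp
  rw [hlen]
  have h1 : m.length + 2 - 1 = m.length + 1 := by omega
  rw [h1, List.cons_append, List.getD_cons_succ]
  rw [List.getD_eq_getElem _ _ (by simp)]
  simp

lemma findMis_shift (a b : Char) (m : List Char) (d : Nat) :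
    ∀ k, m.length - k ≤ d →
      (∃ j, k ≤ j ∧ j < m.length ∧ m.getD j ' ' ≠ m.getD (m.length - 1 - j) ' ') →
      pvFindMis (a :: m ++ [b]) (k + 1) = pvFindMis m k + 1 := by
  induction d with
  | zero =>
    intro k hd hex
    obtain ⟨j, h1, h2, _⟩ := hex
    omega
  | succ d ih =>
    intro k hd hex
    obtain ⟨j, hj1, hj2, hj3⟩ := hex
    have hk : k < m.length := by omega
    have hk2 : k + 1 < (a :: m ++ [b]).length := by simp; omega
    conv_lhs => rw [pvFindMis]
    conv_rhs => rw [pvFindMis]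
    rw [if_pos hk2, if_pos hk]
    rw [mid_getD a b m k hk, mid_getD' a b m k hk]
    by_cases hmis : m.getD k ' ' ≠ m.getD (m.length - 1 - k) ' '
    · rw [if_pos hmis, if_pos hmis]
    · rw [if_neg hmis, if_neg hmis]
      apply ih
      · omega
      · refine ⟨j, ?_, hj2, hj3⟩
        rcases Nat.eq_or_lt_of_le hj1 with h | h
        · exact absurd (h ▸ hj3) hmis
        · omega

lemma findMis_lt (m : List Char) (d : Nat) :
    ∀ k, m.length - k ≤ d →
      (∃ j, k ≤ j ∧ j < m.length ∧ m.getD j ' ' ≠ m.getD (m.length - 1 - j) ' ') →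
      pvFindMis m k < m.length := by
  induction d with
  | zero =>
    intro k hd hex
    obtain ⟨j, h1, h2, _⟩ := hex
    omega
  | succ d ih =>
    intro k hd hex
    obtain ⟨j, hj1, hj2, hj3⟩ := hex
    have hk : k < m.length := by omega
    rw [pvFindMis, if_pos hk]
    by_cases hmis : m.getD k ' ' ≠ m.getD (m.length - 1 - k) ' '
    · rw [if_pos hmis]; exact hk
    · rw [if_neg hmis]
      apply ih
      · omega
      · refine ⟨j, ?_, hj2, hj3⟩
        rcases Nat.eq_or_lt_of_le hj1 with h | h
        · exact absurd (h ▸ hj3) hmis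
        · omega

lemma findMis_zero (sub : List Char) (h0 : 0 < sub.length)
    (hmis : sub.getD 0 ' ' ≠ sub.getD (sub.length - 1 - 0) ' ') : pvFindMis sub 0 = 0 := by
  rw [pvFindMis, if_pos h0, if_pos hmis]

-- the body of first_check_alt past the left ≥ right guard, as a function of the extracted slice
def altCore (sub : List Char) : Int :=
  if sub = sub.reverse then 0
  else
    let i := pvFindMis sub 0
    let j := sub.length - 1 - i
    let c1 := PySem.List.slice sub (some ((i : Int) + 1)) (some ((j : Int) + 1))
    let c2 := PySem.List.slice sub (some (i : Int)) (some (j : Int))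
    if c1 = c1.reverse ∨ c2 = c2.reverse then 1 else 2

lemma alt_eq (s : String) (l r : Int) :
    first_check_alt s l r
      = if l ≥ r then 0 else altCore (PySem.List.slice s.toList (some l) (some (r + 1))) := rfl

lemma slice_nat (sub : List Char) (p q : Nat) :
    PySem.List.slice sub (some ((p : Int))) (some ((q : Int))) = (sub.drop p).take (q - p) :=
  PySem.List.slice_natCast sub p q

lemma slice_nat' (sub : List Char) (p q : Nat) :
    PySem.List.slice sub (some ((p : Int) + 1)) (some ((q : Int) + 1)) = (sub.drop (p+1)).take (q - p) := by
  have h1 : ((p : Int) + 1) = (((p + 1 : Nat)) : Int) := by push_cast; ring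
  have h2 : ((q : Int) + 1) = (((q + 1 : Nat)) : Int) := by push_cast; ring
  rw [h1, h2, slice_nat]
  congr 1
  omega

lemma strip_drop (a b : Char) (m : List Char) (n : Nat) (hn : n ≤ m.length) :
    (a :: m ++ [b]).drop (n + 1) = m.drop n ++ [b] := by
  rw [List.drop_append]
  have h1 : (a :: m).drop (n + 1) = m.drop n := by simp
  have h2 : (n + 1) - (a :: m).length = 0 := by simp; omega
  rw [h1, h2]
  rfl

lemma strip_c1 (a b : Char) (m : List Char) (i : Nat) (hi : i < m.length) :
    PySem.List.slice (a :: m ++ [b]) (some (((i+1 : Nat) : Int) + 1)) (some ((((a :: m ++ [b]).length - 1 - (i+1) : Nat) : Int) + 1))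
    = PySem.List.slice m (some ((i : Int) + 1)) (some (((m.length - 1 - i : Nat) : Int) + 1)) := by
  rw [slice_nat', slice_nat']
  have hlen : (a :: m ++ [b]).length = m.length + 2 := by simp
  rw [hlen, strip_drop a b m (i+1) (by omega)]
  rw [List.take_append_of_le_length (by simp only [List.length_drop]; omega)]
  congr 1
  omega

lemma strip_c2 (a b : Char) (m : List Char) (i : Nat) (hi : i < m.length) :
    PySem.List.slice (a :: m ++ [b]) (some ((i+1 : Nat) : Int)) (some (((a :: m ++ [b]).length - 1 - (i+1) : Nat) : Int))
    = PySem.List.slice m (some (i : Int)) (some ((m.length - 1 - i : Nat) : Int)) := by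
  rw [slice_nat, slice_nat]
  have hlen : (a :: m ++ [b]).length = m.length + 2 := by simp
  rw [hlen, strip_drop a b m i (by omega)]
  rw [List.take_append_of_le_length (by simp only [List.length_drop]; omega)]
  congr 1
  omega

lemma altCore_strip (a b : Char) (m : List Char) (hab : a = b) :
    altCore (a :: m ++ [b]) = altCore m := by
  by_cases hm : m = m.reverse
  · have hsub : (a :: m ++ [b]) = (a :: m ++ [b]).reverse := (pal_decomp a b m).mpr ⟨hab, hm⟩
    rw [altCore, altCore, if_pos hsub, if_pos hm]
  · have hsub : ¬ (a :: m ++ [b]) = (a :: m ++ [b]).reverse := fun h => hm ((pal_decomp a b m).mp h).2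
    obtain ⟨j, hj1, hj2⟩ := notpal_mis m hm
    have hex : ∃ j, 0 ≤ j ∧ j < m.length ∧ m.getD j ' ' ≠ m.getD (m.length - 1 - j) ' ' :=
      ⟨j, Nat.zero_le j, hj1, hj2⟩
    have hilt : pvFindMis m 0 < m.length := findMis_lt m m.length 0 (by omega) hex
    have hshift : pvFindMis (a :: m ++ [b]) (0 + 1) = pvFindMis m 0 + 1 :=
      findMis_shift a b m m.length 0 (by omega) hex
    have h0 : pvFindMis (a :: m ++ [b]) 0 = pvFindMis m 0 + 1 := by
      rw [pvFindMis]
      rw [if_pos (by simp)]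
      have hz : (a :: m ++ [b]).length - 1 - 0 = (a :: m ++ [b]).length - 1 := by omega
      rw [hz, ends_getD_head, ends_getD_last]
      rw [if_neg (by simp [hab])]
      exact hshift
    rw [altCore, altCore, if_neg hsub, if_neg hm]
    simp only [h0]
    rw [strip_c1 a b m (pvFindMis m 0) hilt, strip_c2 a b m (pvFindMis m 0) hilt]

lemma altCore_mismatch (a b : Char) (m : List Char) (hab : a ≠ b) :
    altCore (a :: m ++ [b])
      = if (m ++ [b]) = (m ++ [b]).reverse ∨ (a :: m) = (a :: m).reverse then 1 else 2 := by
  have hnp : ¬ (a :: m ++ [b]) = (a :: m ++ [b]).reverse := fun h => hab ((pal_decomp a b m).mp h).1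
  have hlen : (a :: m ++ [b]).length = m.length + 2 := by simp
  have hz : pvFindMis (a :: m ++ [b]) 0 = 0 := by
    apply findMis_zero
    · simp
    · have h1 : (a :: m ++ [b]).length - 1 - 0 = (a :: m ++ [b]).length - 1 := by omega
      rw [h1, ends_getD_head, ends_getD_last]
      exact hab
  rw [altCore, if_neg hnp]
  simp only [hz]
  have hc1 : PySem.List.slice (a :: m ++ [b]) (some (((0:Nat) : Int) + 1))
      (some ((((a :: m ++ [b]).length - 1 - 0 : Nat) : Int) + 1)) = m ++ [b] := by
    rw [slice_nat', hlen]
    have hd : (a :: m ++ [b]).drop (0 + 1) = m ++ [b] := by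
      rw [List.cons_append]
      rfl
    rw [hd]
    apply List.take_of_length_le
    simp
  have hc2 : PySem.List.slice (a :: m ++ [b]) (some ((0:Nat) : Int))
      (some (((a :: m ++ [b]).length - 1 - 0 : Nat) : Int)) = a :: m := by
    rw [slice_nat, hlen, List.drop_zero, List.cons_append]
    have h2 : m.length + 2 - 1 - 0 - 0 = m.length + 1 := by omega
    rw [h2]
    rw [List.take_succ_cons]
    congr 1
    rw [List.take_append_of_le_length (by omega)]
    exact List.take_of_length_le (by omega)
  norm_cast at hc1 hc2 ⊢
  rw [hc1, hc2]

lemma slice_seg (cs : List Char) (l r : Int) (hl : 0 ≤ l) (hr : 0 ≤ r) :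
    PySem.List.slice cs (some l) (some (r + 1))
      = (cs.drop l.toNat).take (r.toNat + 1 - l.toNat) := by
  conv_lhs => rw [show l = ((l.toNat : Nat) : Int) by omega,
    show r + 1 = ((r.toNat + 1 : Nat) : Int) by omega]
  rw [slice_nat]

lemma main_loop (s : String) (d : Nat) : ∀ (l r : Int), (r - l).toNat ≤ d →
    Pre_first_check s l r → first_check s l r = first_check_alt s l r := by
  induction d with
  | zero =>
    intro l r hd _hpre
    have hlr : ¬ l < r := by omega
    rw [first_check, alt_eq]
    simp [hlr, show l ≥ r by omega]
  | succ d ih =>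
    intro l r hd hpre
    by_cases hlr : l < r
    · obtain ⟨hl, hr⟩ := hpre hlr
      have hr0 : (0:Int) ≤ r := by omega
      have hll : l < (s.toList.length : Int) := by omega
      have hseg := seg_decomp s.toList l.toNat r.toNat (by omega) (by omega)
      have hMlen : ((s.toList.drop (l.toNat + 1)).take (r.toNat - 1 + 1 - (l.toNat + 1))).length
          = r.toNat - l.toNat - 1 := by
        simp only [List.length_take, List.length_drop]
        omega
      have halt : first_check_alt s l r
          = altCore ((s.toList.drop l.toNat).take (r.toNat + 1 - l.toNat)) := by
        rw [alt_eq, if_neg (by omega), slice_seg s.toList l r hl hr0]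
      rw [first_check]
      simp only [hlr, dite_true]
      rw [pyGet_eq s l hl hll, pyGet_eq s r hr0 hr]
      show (if s.toList.getD l.toNat ' ' = s.toList.getD r.toNat ' '
            then first_check s (l + 1) (r - 1)
            else if second_check s (l + 1) r || second_check s l (r - 1) then 1 else 2)
          = first_check_alt s l r
      by_cases hab : s.toList.getD l.toNat ' ' = s.toList.getD r.toNat ' '
      · rw [if_pos hab]
        have hpre2 : Pre_first_check s (l + 1) (r - 1) := by
          intro _h2
          constructor <;> omega
        rw [ih (l + 1) (r - 1) (by omega) hpre2]
        rw [halt, hseg, altCore_strip _ _ _ hab]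
        by_cases hlr2 : l + 1 < r - 1
        · rw [alt_eq, if_neg (by omega), slice_seg s.toList (l+1) (r-1) (by omega) (by omega),
            show (l+1).toNat = l.toNat + 1 by omega, show (r-1).toNat = r.toNat - 1 by omega]
        · rw [alt_eq, if_pos (by omega)]
          rw [altCore, if_pos (pal_short _ (by rw [hMlen]; omega))]
      · rw [if_neg hab]
        rw [halt, hseg, altCore_mismatch _ _ _ hab]
        have hsc1 := sc_spec s ((r - (l+1)).toNat) (l+1) r le_rfl (by omega) hr
        have hsc2 := sc_spec s ((r - 1 - l).toNat) l (r-1) le_rfl hl (by omega)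
        have hcast1 : (l + 1).toNat = l.toNat + 1 := by omega
        have hcast1' : (r + 1 - (l + 1)).toNat = r.toNat - l.toNat := by omega
        have hcast2 : (r - 1 + 1 - l).toNat = r.toNat - l.toNat := by omega
        rw [hcast1, hcast1'] at hsc1
        rw [hcast2] at hsc2
        -- identify the two candidate slices with the A-side scan ranges
        have hM1 : (s.toList.drop (l.toNat + 1)).take (r.toNat - l.toNat)
            = (s.toList.drop (l.toNat + 1)).take (r.toNat - 1 + 1 - (l.toNat + 1)) ++ [s.toList.getD r.toNat ' '] := by
          have := congrArg (List.drop 1) hseg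
          rw [List.drop_take, List.drop_drop, List.cons_append, List.drop_one, List.tail_cons] at this
          rw [show r.toNat + 1 - l.toNat - 1 = r.toNat - l.toNat by omega] at this
          exact this
        have hM2 : (s.toList.drop l.toNat).take (r.toNat - l.toNat)
            = s.toList.getD l.toNat ' ' :: (s.toList.drop (l.toNat + 1)).take (r.toNat - 1 + 1 - (l.toNat + 1)) := by
          have := congrArg (List.take (r.toNat - l.toNat)) hseg
          rw [List.take_take, min_eq_left (by omega), List.cons_append] at this
          rw [this, show r.toNat - l.toNat = (r.toNat - l.toNat - 1) + 1 by omega,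
            List.take_succ_cons]
          congr 1
          rw [List.take_append_of_le_length (by rw [hMlen])]
          exact List.take_of_length_le (by rw [hMlen])
        rw [hM1] at hsc1
        rw [hM2] at hsc2
        rw [hsc1, hsc2]
        by_cases h1 : ((s.toList.drop (l.toNat + 1)).take (r.toNat - 1 + 1 - (l.toNat + 1)) ++ [s.toList.getD r.toNat ' ']
              = ((s.toList.drop (l.toNat + 1)).take (r.toNat - 1 + 1 - (l.toNat + 1)) ++ [s.toList.getD r.toNat ' ']).reverse) <;>
          by_cases h2 : (s.toList.getD l.toNat ' ' :: (s.toList.drop (l.toNat + 1)).take (r.toNat - 1 + 1 - (l.toNat + 1))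
              = (s.toList.getD l.toNat ' ' :: (s.toList.drop (l.toNat + 1)).take (r.toNat - 1 + 1 - (l.toNat + 1))).reverse) <;>
          simp [h1, h2]
    · rw [first_check, alt_eq]
      simp [hlr, show l ≥ r by omega]

-- ===== VERDICT (by name: the statement is the Claim_ definition above) =====
theorem first_check_spec : Claim_equal_first_check := by
  intro s left right _hdom hpre
  unfold Spec_first_check
  exact main_loop s ((right - left).toNat) left right le_rfl hpre
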